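-- pv_equiv track=rewrite | github.com/KDSBirdi/basic-python-project | main.py | chk_winning
-- ===== SOURCE A (Python) =====
-- def chk_winning(columns, lines, bet, values):
--     winnings = 0
--     winning_lines = []
--     for line in range(lines):
--         symbol = columns[0][line]
--         for column in columns:
--             symbol_to_chk = column[line]
--             if symbol != symbol_to_chk:
--                 break
--         else:
--             winnings+= values[symbol] * bet
--             winning_lines.append(line + 1)
--     return winnings, winning_lines
-- ===== SOURCE B (Python) =====
-- def chk_winning(columns, lines, bet, values):
--     ref = [columns[0][line] for line in range(lines)]
--     survivors = list(range(lines))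
--     for column in columns:
--         survivors = [line for line in survivors if column[line] == ref[line]]
--     winnings = sum(values[ref[line]] * bet for line in survivors)
--     return winnings, [line + 1 for line in survivors]
-- ===== Notes on version B (the rewrite author's own statement) =====
-- stated objective: alternative
-- what changed: Swaps the loop nesting: instead of scanning the columns per line with an early break, B precomputes the reference row and makes one pass over the columns, each pass filtering a shrinking survivor list of line indices; payout and 1-based lines are read off the final survivors.
-- outside the precondition, e.g. on chk_winning([['a', 'x'], ['b', 'y'], ['c']], 2, 1, {}): A returns (0, []), B returns (0, [])
import Mathlib
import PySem

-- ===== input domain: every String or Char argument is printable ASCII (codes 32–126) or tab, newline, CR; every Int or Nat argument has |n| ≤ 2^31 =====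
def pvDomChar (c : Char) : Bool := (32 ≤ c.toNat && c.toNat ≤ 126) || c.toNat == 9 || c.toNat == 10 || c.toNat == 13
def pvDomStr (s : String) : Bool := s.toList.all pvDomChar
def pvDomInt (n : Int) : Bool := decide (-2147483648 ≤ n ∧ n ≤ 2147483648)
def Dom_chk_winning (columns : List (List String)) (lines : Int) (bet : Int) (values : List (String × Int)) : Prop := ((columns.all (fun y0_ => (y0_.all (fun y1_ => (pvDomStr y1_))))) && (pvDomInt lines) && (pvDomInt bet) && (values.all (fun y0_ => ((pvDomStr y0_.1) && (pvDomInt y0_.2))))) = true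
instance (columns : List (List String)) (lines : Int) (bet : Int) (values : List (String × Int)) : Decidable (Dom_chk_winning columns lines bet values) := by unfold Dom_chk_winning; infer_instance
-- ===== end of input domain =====

-- B swaps the loop nesting: instead of A's per-line scan over columns with an early break, it
-- precomputes the reference row, then makes one pass over the COLUMNS, each pass filtering a
-- shrinking survivor list of line indices; payout and 1-based lines are read off the survivors
-- (objective: alternative; same asymptotic cost).

-- dict lookup values[symbol]: first match in the association list (default unused under Pre_)
def pyDictGet (values : List (String × Int)) (s : String) : Int :=
  ((values.find? (fun p => p.1 == s)).map Prod.snd).getD 0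

-- ===== PORT A =====
-- 'for column in columns: if symbol != column[line]: break / else:' — true ↔ the else branch runs
def chkA_scan (columns : List (List String)) (symbol : String) (line : Int) : Bool :=
  match columns with
  | [] => true
  | c :: rest =>
      if symbol != (PySem.List.pyGet? c line).getD "" then false
      else chkA_scan rest symbol line

def chk_winning (columns : List (List String)) (lines : Int) (bet : Int) (values : List (String × Int)) : Int × List Int :=
  (PySem.List.pyRange 0 lines 1).foldl (fun st line =>
    let symbol := (PySem.List.pyGet? ((PySem.List.pyGet? columns 0).getD []) line).getD ""
    if chkA_scan columns symbol line then
      (st.1 + pyDictGet values symbol * bet, st.2 ++ [line + 1])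
    else st) (0, [])

-- ===== PORT B =====
def chk_winning_alt (columns : List (List String)) (lines : Int) (bet : Int) (values : List (String × Int)) : Int × List Int :=
  -- ref = [columns[0][line] for line in range(lines)]
  let ref := (PySem.List.pyRange 0 lines 1).map (fun line =>
    (PySem.List.pyGet? ((PySem.List.pyGet? columns 0).getD []) line).getD "")
  -- survivors = list(range(lines)); for column in columns: survivors = [... if column[line] == ref[line]]
  let survivors := columns.foldl (fun surv column =>
    surv.filter (fun line =>
      (PySem.List.pyGet? column line).getD "" == (PySem.List.pyGet? ref line).getD ""))
    (PySem.List.pyRange 0 lines 1)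
  -- winnings = sum(values[ref[line]] * bet for line in survivors)
  let winnings := (survivors.map (fun line =>
    pyDictGet values ((PySem.List.pyGet? ref line).getD "") * bet)).sum
  (winnings, survivors.map (fun line => line + 1))

-- ===== PRECONDITION & SPEC =====
-- Pre_ excludes inputs where A raises (empty columns with lines > 0, an out-of-range row index, a
-- symbol of a unanimous line missing from values) and, conservatively, ragged inputs with some
-- column shorter than `lines` even where A's early break lets it return (B returns the same there).
def Pre_chk_winning (columns : List (List String)) (lines : Int) (bet : Int) (values : List (String × Int)) : Prop :=
  lines ≤ 0 ∨ (columns ≠ [] ∧ (∀ c ∈ columns, lines ≤ (c.length : Int)) ∧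
    ∀ n ∈ List.range lines.toNat,
      (∀ c ∈ columns, c.getD n "" = (columns.headD []).getD n "") →
        ((columns.headD []).getD n "") ∈ values.map Prod.fst)
instance (columns : List (List String)) (lines : Int) (bet : Int) (values : List (String × Int)) : Decidable (Pre_chk_winning columns lines bet values) := by unfold Pre_chk_winning; infer_instance

def pvWitness_chk_winning : List (List String) × Int × Int × (List (String × Int)) :=
  ([["a", "b"], ["a", "c"]], 2, 3, [("a", 5), ("b", 2), ("c", 1)])

def Spec_chk_winning (columns : List (List String)) (lines : Int) (bet : Int) (values : List (String × Int)) (out : Int × List Int) : Prop := out = chk_winning_alt columns lines bet values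
instance (columns : List (List String)) (lines : Int) (bet : Int) (values : List (String × Int)) (out : Int × List Int) : Decidable (Spec_chk_winning columns lines bet values out) := by unfold Spec_chk_winning; infer_instance

-- ===== CLAIM (what is proved, stated in full; the proofs are below) =====
def Claim_equal_chk_winning : Prop := ∀ (columns : List (List String)) (lines : Int) (bet : Int) (values : List (String × Int)), Dom_chk_winning columns lines bet values → Pre_chk_winning columns lines bet values → Spec_chk_winning columns lines bet values (chk_winning columns lines bet values)

-- ===== LEMMAS AND PROOFS =====

-- A's break-scan returns true iff every column's symbol equals `symbol`
theorem chkA_scan_eq_all (columns : List (List String)) (symbol : String) (line : Int) :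
    chkA_scan columns symbol line
      = columns.all (fun c => symbol == (PySem.List.pyGet? c line).getD "") := by
  induction columns with
  | nil => rfl
  | cons c rest ih =>
      simp only [chkA_scan, List.all_cons, ih]
      by_cases h : symbol = (PySem.List.pyGet? c line).getD "" <;> simp [h]

-- B's survivor pass: folding the per-column filters = one filter by "all columns agree"
theorem foldl_filter_eq_filter_all {α β : Type} (p : β → α → Bool) (cols : List β) (s : List α) :
    cols.foldl (fun surv c => surv.filter (p c)) s
      = s.filter (fun x => cols.all (fun c => p c x)) := by
  induction cols generalizing s with
  | nil => simp
  | cons c rest ih => simp [ih, List.filter_filter, Bool.and_comm]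

-- shape of A's accumulating fold: filter + map + sum / append
theorem foldl_win_shape (q : Int → Bool) (p : Int → Int) (l : List Int) (acc : Int) (out : List Int) :
    l.foldl (fun (st : Int × List Int) line =>
        if q line then (st.1 + p line, st.2 ++ [line + 1]) else st) (acc, out)
      = (acc + ((l.filter q).map p).sum, out ++ (l.filter q).map (fun line => line + 1)) := by
  induction l generalizing acc out with
  | nil => simp
  | cons x xs ih =>
      by_cases hx : q x
      · simp [hx, ih, add_assoc]
      · simp [hx, ih]

-- inside range(lines), ref[line] is exactly A's per-line reference symbol columns[0][line]
theorem ref_lookup (columns : List (List String)) (lines line : Int)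
    (h : line ∈ PySem.List.pyRange 0 lines 1) :
    (PySem.List.pyGet? ((PySem.List.pyRange 0 lines 1).map (fun l =>
        (PySem.List.pyGet? ((PySem.List.pyGet? columns 0).getD []) l).getD "")) line).getD ""
      = (PySem.List.pyGet? ((PySem.List.pyGet? columns 0).getD []) line).getD "" := by
  rw [PySem.List.mem_pyRange_one] at h
  exact PySem.List.pyGetD_map_pyRange_of_nonneg _ _ _ _ h.1 h.2

-- ===== VERDICT (by name: the statement is the Claim_ definition above) =====
theorem chk_winning_spec : Claim_equal_chk_winning := by
  intro columns lines bet values _hdom _hpre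
  unfold Spec_chk_winning chk_winning chk_winning_alt
  simp only []
  rw [foldl_win_shape, foldl_filter_eq_filter_all]
  have hfil : (PySem.List.pyRange 0 lines 1).filter (fun line =>
      chkA_scan columns ((PySem.List.pyGet? ((PySem.List.pyGet? columns 0).getD []) line).getD "") line)
    = (PySem.List.pyRange 0 lines 1).filter (fun line =>
      columns.all (fun c => (PySem.List.pyGet? c line).getD ""
        == (PySem.List.pyGet? ((PySem.List.pyRange 0 lines 1).map (fun l =>
             (PySem.List.pyGet? ((PySem.List.pyGet? columns 0).getD []) l).getD "")) line).getD "")) := by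
    apply List.filter_congr
    intro line hline
    rw [chkA_scan_eq_all, ref_lookup columns lines line hline]
    simp only [BEq.comm]
  rw [hfil]
  refine Prod.ext ?_ (by simp)
  simp only [zero_add]
  apply congrArg List.sum
  apply List.map_congr_left
  intro line hline
  rw [ref_lookup columns lines line (List.mem_of_mem_filter hline)]
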